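-- pv_equiv track=rewrite | github.com/Monishkumar2801/bfhl-api | app.py | alternating_caps_reverse
-- ===== SOURCE A (Python) =====
-- def alternating_caps_reverse(s):
--     res = ""
--     make_upper = True
--     for ch in reversed(s):
--         if ch.isalpha():
--             res += ch.upper() if make_upper else ch.lower()
--             make_upper = not make_upper
--     return res
-- ===== SOURCE B (Python) =====
-- def alternating_caps_reverse(s):
--     total = sum(1 for ch in s if ch.isalpha())
--     parts = []
--     seen = 0
--     for ch in s:
--         if ch.isalpha():
--             remaining = total - seen - 1
--             parts.append(ch.upper() if remaining % 2 == 0 else ch.lower())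
--             seen += 1
--     parts.reverse()
--     return "".join(parts)
-- ===== Notes on version B (the rewrite author's own statement) =====
-- stated objective: alternative
-- what changed: B never iterates the reversed string: it counts the letters, then walks s forward casing each letter by the parity of the number of letters after it, and reverses the collected pieces at the end, replacing A's reversed-iteration boolean toggle.
import Mathlib
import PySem

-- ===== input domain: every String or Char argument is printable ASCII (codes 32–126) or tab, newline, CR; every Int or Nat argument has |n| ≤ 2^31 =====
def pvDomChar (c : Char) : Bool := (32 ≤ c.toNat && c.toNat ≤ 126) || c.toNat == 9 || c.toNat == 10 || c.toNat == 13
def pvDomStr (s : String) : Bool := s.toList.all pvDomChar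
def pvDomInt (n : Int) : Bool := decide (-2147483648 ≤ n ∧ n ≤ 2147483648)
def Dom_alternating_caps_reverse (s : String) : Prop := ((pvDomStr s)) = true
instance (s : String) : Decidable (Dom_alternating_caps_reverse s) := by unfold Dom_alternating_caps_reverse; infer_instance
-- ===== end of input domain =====

-- B replaces A's reversed-iteration toggle loop by a forward algorithm: count the
-- letters, case each forward letter by the parity of the letters after it, reverse
-- the collected pieces at the end (objective "alternative").

-- ===== PORT A =====
-- A's loop over reversed(s) with state (res, make_upper); branches in source order.
def pvGoA : List Char → List Char → Bool → List Char
| [], res, _ => res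
| ch :: t, res, mu =>
    if PySem.Chars.isalpha ch then
      pvGoA t (res ++ [if mu then PySem.Chars.upperChar ch else PySem.Chars.lowerChar ch]) (!mu)
    else
      pvGoA t res mu

def alternating_caps_reverse (s : String) : String :=
  String.mk (pvGoA s.toList.reverse [] true)

-- ===== PORT B =====
-- first pass: total = sum(1 for ch in s if ch.isalpha())
def pvTotalB (s : String) : Int :=
  s.toList.foldl (fun acc ch => if PySem.Chars.isalpha ch then acc + 1 else acc) 0

-- forward loop with state (seen, parts); casing by remaining = total - seen - 1
def pvGoB : List Char → Int → Int → List Char → List Char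
| [], _, _, parts => parts
| ch :: t, total, seen, parts =>
    if PySem.Chars.isalpha ch then
      pvGoB t total (seen + 1)
        (parts ++ [if PySem.Int.mod (total - seen - 1) 2 == 0 then PySem.Chars.upperChar ch else PySem.Chars.lowerChar ch])
    else
      pvGoB t total seen parts

def alternating_caps_reverse_alt (s : String) : String :=
  String.mk (pvGoB s.toList (pvTotalB s) 0 []).reverse

-- ===== PRECONDITION & SPEC =====
def Spec_alternating_caps_reverse (s : String) (out : String) : Prop := out = alternating_caps_reverse_alt s
instance (s : String) (out : String) : Decidable (Spec_alternating_caps_reverse s out) := by unfold Spec_alternating_caps_reverse; infer_instance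

-- ===== CLAIM (what is proved, stated in full; the proofs are below) =====
def Claim_equal_alternating_caps_reverse : Prop := ∀ (s : String), Dom_alternating_caps_reverse s → Spec_alternating_caps_reverse s (alternating_caps_reverse s)

-- ===== LEMMAS AND PROOFS =====

-- canonical alternating-case map: mu says whether the next letter is uppercased
def pvAlt : Bool → List Char → List Char
| _, [] => []
| mu, c :: t => (if mu then PySem.Chars.upperChar c else PySem.Chars.lowerChar c) :: pvAlt (!mu) t

-- the casing map B applies at (running) letter index k
def pvCaseB (total k : Int) (c : Char) : Char :=
  if PySem.Int.mod (total - k - 1) 2 == 0 then PySem.Chars.upperChar c else PySem.Chars.lowerChar c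

-- B's map over the filtered letters with a running index
def pvMapB (total : Int) : Int → List Char → List Char
| _, [] => []
| k, c :: t => pvCaseB total k c :: pvMapB total (k + 1) t

theorem pvGoA_eq_alt : ∀ (l res : List Char) (mu : Bool),
    pvGoA l res mu = res ++ pvAlt mu (l.filter PySem.Chars.isalpha) := by
  intro l
  induction l with
  | nil => intro res mu; simp [pvGoA, pvAlt]
  | cons c t ih =>
    intro res mu
    by_cases h : PySem.Chars.isalpha c = true
    · simp [pvGoA, h, ih, pvAlt, List.filter_cons]
    · simp [pvGoA, h, ih, List.filter_cons]

theorem pvGoB_eq_map : ∀ (l : List Char) (total seen : Int) (parts : List Char),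
    pvGoB l total seen parts = parts ++ pvMapB total seen (l.filter PySem.Chars.isalpha) := by
  intro l
  induction l with
  | nil => intro total seen parts; simp [pvGoB, pvMapB]
  | cons c t ih =>
    intro total seen parts
    by_cases h : PySem.Chars.isalpha c = true
    · simp [pvGoB, h, ih, pvMapB, pvCaseB, List.filter_cons]
    · simp [pvGoB, h, ih, List.filter_cons]

theorem pvTotalB_eq : ∀ (l : List Char) (acc : Int),
    l.foldl (fun acc ch => if PySem.Chars.isalpha ch then acc + 1 else acc) acc
      = acc + ((l.filter PySem.Chars.isalpha).length : Int) := by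
  intro l
  induction l with
  | nil => intro acc; simp
  | cons c t ih =>
    intro acc
    by_cases h : PySem.Chars.isalpha c = true
    · simp [List.foldl_cons, h, ih, List.filter_cons]; ring
    · simp [List.foldl_cons, h, ih, List.filter_cons]

theorem pvMapB_append : ∀ (ys : List Char) (total k : Int) (c : Char),
    pvMapB total k (ys ++ [c]) = pvMapB total k ys ++ [pvCaseB total (k + ys.length) c] := by
  intro ys
  induction ys with
  | nil => intro total k c; simp [pvMapB]
  | cons y t ih =>
    intro total k c
    simp only [List.cons_append, pvMapB, ih, List.length_cons]
    congr 2
    push_cast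
    ring_nf

theorem pvMapB_rev_eq_alt : ∀ (ys : List Char) (k m : Nat),
    (pvMapB ((k + ys.length + m : Nat) : Int) (k : Int) ys).reverse
      = pvAlt (m % 2 == 0) ys.reverse := by
  intro ys
  induction ys using List.reverseRecOn with
  | nil => intro k m; simp [pvMapB, pvAlt]
  | append_singleton t c ih =>
    intro k m
    rw [pvMapB_append]
    have hc : pvCaseB ((k + (t ++ [c]).length + m : Nat) : Int) ((k : Int) + (t.length : Int)) c
        = (if m % 2 == 0 then PySem.Chars.upperChar c else PySem.Chars.lowerChar c) := by
      unfold pvCaseB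
      have h1 : ((k + (t ++ [c]).length + m : Nat) : Int) - ((k : Int) + (t.length : Int)) - 1 = (m : Int) := by
        simp [List.length_append]; push_cast; ring
      rw [h1]
      have h2 : PySem.Int.mod (m : Int) 2 = ((m % 2 : Nat) : Int) := by
        rw [PySem.Int.mod_eq_emod_of_pos (by norm_num)]; omega
      rw [h2]
      rcases Nat.mod_two_eq_zero_or_one m with h | h <;> simp [h]
    have htot : ((k + (t ++ [c]).length + m : Nat) : Int) = ((k + t.length + (m + 1) : Nat) : Int) := by
      simp [List.length_append]; push_cast; ring
    have hih := ih k (m + 1)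
    have hb : ((m + 1) % 2 == 0) = !(m % 2 == 0) := by
      rcases Nat.mod_two_eq_zero_or_one m with h | h <;> simp [Nat.add_mod, h]
    rw [hb] at hih
    rw [htot] at hc ⊢
    simp only [List.reverse_append, List.reverse_cons, List.reverse_nil, List.nil_append,
      List.cons_append, hc, hih]
    simp [pvAlt]

theorem alternating_caps_reverse_spec : Claim_equal_alternating_caps_reverse := by
  intro s _
  unfold Spec_alternating_caps_reverse alternating_caps_reverse alternating_caps_reverse_alt pvTotalB
  rw [pvGoA_eq_alt, pvGoB_eq_map, pvTotalB_eq, List.nil_append, List.nil_append]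
  set fl := s.toList.filter PySem.Chars.isalpha with hfl
  have h1 : s.toList.reverse.filter PySem.Chars.isalpha = fl.reverse := by
    simp [hfl, List.filter_reverse]
  rw [h1]
  have h := pvMapB_rev_eq_alt fl 0 0
  simp only [Nat.zero_add, Nat.add_zero, Nat.cast_zero] at h
  rw [show ((0 : Nat) % 2 == 0) = true from rfl] at h
  rw [zero_add, h]
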